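/- PORTED by tools/port_fixed.py from Prog/Jsmn/S/StrEsc.lean to THE FIXED IMAGE fixed/jsmn_s.bin (same bytes at the same addresses; binFS). Do not edit: edit the original and port again. -/
/-
  jsmn_s.bin, `jsmn_parse_string`: the escape switch (10024FH) — `"` `/` `\` `b` `f` `n` `r` `t` go on, `u` enters the hex loop, anything else
  is JSMN_ERROR_INVAL. gcc: c > 'u' → INVAL; c < '\' → (`"` or `/` → ok, else INVAL); else a BIT TEST of 1 << (c - 5CH) against 1440441H and 2000000H.
-/
import Prog.Jsmn.Fixed.Specs
import Prog.Jsmn.Fixed.CodeFS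
import Prog.Jsmn.Fixed.S.StrHead
import Prog.Jsmn.Fixed.S.StrLemmas
namespace X86
namespace J6
namespace FS
namespace Str
open X86.User (CodeAt RegsKept Span FlagsOK Layout toNat_add_ofNat toNat_ofNat_lt' add_ofNat_add)
open Jsmn JsmnFSBytes

set_option maxRecDepth 100000
set_option maxHeartbeats 4000000
set_option linter.unusedSimpArgs false
set_option linter.unusedVariables false

variable {c : SCtx} {n : User.Layout} {v0 v : User.State}

/-- At the head of the hex loop (1001D7H): `i` digits read (in ecx), `parser->pos = h`. -/
def AtHex (c : SCtx) (n : User.Layout) (v0 v : User.State) (i h : Nat) : Prop := At c n v0 v 0x1001d7 h ∧ v.reg .rcx = UInt64.ofNat i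

/-- 10024FH → `pos++` (100221H) after a simple escape | the hex loop (1001D7H) after `\u` | JSMN_ERROR_INVAL (1001CAH). -/
theorem esc (he : Entry c n v0) {q : Nat} (ha : AtEsc c n v0 v q) (hq1 : u32 ((q : Int) + 1) < c.js.length) :
    Reach n v (fun v' =>
      (isSimpleEscape (charAt c.js (u32 ((q : Int) + 1))) = true ∧ At c n v0 v' 0x100221 (u32 ((q : Int) + 1))) ∨
      (isSimpleEscape (charAt c.js (u32 ((q : Int) + 1))) = false ∧ charAt c.js (u32 ((q : Int) + 1)) = 0x75 ∧
        AtHex c n v0 v' 0 (u32 ((u32 ((q : Int) + 1) : Int) + 1))) ∨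
      (isSimpleEscape (charAt c.js (u32 ((q : Int) + 1))) = false ∧ charAt c.js (u32 ((q : Int) + 1)) ≠ 0x75 ∧
        AtRet c n v0 v' JSMN_ERROR_INVAL c.p c.toks)) := by
  obtain ⟨hp, hr8⟩ := he
  obtain ⟨⟨hrip, hf⟩, hrcx, hrax, hrdx⟩ := ha
  have hW := hp.toksW
  v3_open hp hf hW
  j6f_bin
  have hq32 : q < 2 ^ 32 := hf_core_parser_pos ▸ User.Mem.readLE4_lt _ _
  have hpos : c.p.pos < 2 ^ 32 := hp_parser_pos ▸ User.Mem.readLE4_lt _ _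
  generalize hq1' : u32 ((q : Int) + 1) = q1 at *
  have hq1lt : q1 < 2 ^ 32 := by rw [← hq1', u32_succ]; omega
  have hch := char_read hf_text q1 hq1
  have hc8 := (charAt c.js q1).toNat_lt
  have hlow : Word.low .w32 (UInt64.ofNat q1) = UInt64.ofNat q1 := Word.low_of_lt _ (by show (UInt64.ofNat q1).toNat < 2 ^ 32; v3_omega)
  have hlowp : Word.low .w32 (UInt64.ofNat c.p.pos) = UInt64.ofNat c.p.pos :=
    Word.low_of_lt _ (by show (UInt64.ofNat c.p.pos).toNat < 2 ^ 32; v3_omega)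
  v3_walk hf_core_code hp.call.fetch [hlow, hlowp] until [0x1001ca, 0x100221, 0x1001d7]
  · -- above 'u'
    have h1 : 117 < (charAt c.js q1).toNat := by v3_omega
    refine Reach.done (Or.inr (Or.inr ⟨simple_false _ (by omega), byte_ne_ofNat_of_toNat (k := 117) (by omega) (by decide), by strs_fail_f⟩))
  · -- '"'
    have h1 : (charAt c.js q1).toNat = 34 := by v3_omega
    refine Reach.done (Or.inl ⟨(simple_iff _).mpr (by omega), by simp, ?_⟩)
    strs_frame_f
    v3_read
  · -- '/'
    have h1 : (charAt c.js q1).toNat = 47 := by v3_omega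
    refine Reach.done (Or.inl ⟨(simple_iff _).mpr (by omega), by simp, ?_⟩)
    strs_frame_f
    v3_read
  · -- below '\\', neither '"' nor '/'
    have h1 : (charAt c.js q1).toNat < 92 ∨ 128 ≤ (charAt c.js q1).toNat := by v3_omega
    have h2 : ¬ (charAt c.js q1).toNat = 34 := by v3_omega
    have h3 : ¬ (charAt c.js q1).toNat = 47 := by v3_omega
    refine Reach.done (Or.inr (Or.inr ⟨simple_false _ (by omega), byte_ne_ofNat_of_toNat (k := 117) (by omega) (by decide), by strs_fail_f⟩))
  · -- '\\' 'b' 'f' 'n' 'r' 't': the first bit test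
    have h1 : 92 ≤ (charAt c.js q1).toNat ∧ (charAt c.js q1).toNat ≤ 117 := by v3_omega
    obtain ⟨k, hk⟩ : ∃ k, (charAt c.js q1).toNat = k + 92 := ⟨(charAt c.js q1).toNat - 92, by omega⟩
    rw [hk] at hbr_100277
    have hb := ((esc_bits k (by omega)).1).mp hbr_100277
    refine Reach.done (Or.inl ⟨(simple_iff _).mpr (by omega), by simp, ?_⟩)
    strs_frame_f
    v3_read
  · -- neither bit: not an escape
    have h1 : 92 ≤ (charAt c.js q1).toNat ∧ (charAt c.js q1).toNat ≤ 117 := by v3_omega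
    obtain ⟨k, hk⟩ : ∃ k, (charAt c.js q1).toNat = k + 92 := ⟨(charAt c.js q1).toNat - 92, by omega⟩
    rw [hk] at hbr_100277 hbr_10027e
    have hb1 : ¬ (k = 0 ∨ k = 6 ∨ k = 10 ∨ k = 18 ∨ k = 22 ∨ k = 24) := fun h => ((esc_bits k (by omega)).1).mpr h hbr_100277
    have hb2 : ¬ k = 25 := fun h => ((esc_bits k (by omega)).2).mpr h hbr_10027e
    refine Reach.done (Or.inr (Or.inr ⟨simple_false _ (by omega), byte_ne_ofNat_of_toNat (k := 117) (by omega) (by decide), by strs_fail_f⟩))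
  · -- 'u': pos + 2, i = 0
    have h1 : 92 ≤ (charAt c.js q1).toNat ∧ (charAt c.js q1).toNat ≤ 117 := by v3_omega
    obtain ⟨k, hk⟩ : ∃ k, (charAt c.js q1).toNat = k + 92 := ⟨(charAt c.js q1).toNat - 92, by omega⟩
    rw [hk] at hbr_100277 hbr_10027e
    have hb2 : k = 25 := ((esc_bits k (by omega)).2).mp hbr_10027e
    have hq1'' : q1 = (q + 1) % 4294967296 := by rw [← hq1', u32_succ]
    refine Reach.done (Or.inr (Or.inl ⟨simple_false _ (by omega), byte_eq_ofNat_of_toNat (k := 117) (by omega) (by decide), ⟨by simp, ?_⟩, by v3_regnorm; rfl⟩))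
    strs_frame_f
    rw [u32_succ]
    v3_read

end Str
end FS
end J6
end X86
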